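-- pv_equiv track=rewrite | github.com/lukaszbalcerzakk/code_snippets | pbi-analyzer/analyzer_cli.py | _find_from_for_select
-- ===== SOURCE A (Python) =====
-- def _find_from_for_select(content: str, select_pos: int) -> int:
--     pos = select_pos + 6
--     paren_level = 0
--
--     while pos < len(content):
--         char = content[pos]
--
--         if char == '(':
--             paren_level += 1
--         elif char == ')':
--             paren_level -= 1
--         elif paren_level == 0:
--             if content[pos:pos+4].lower() == 'from':
--                 before_ok = pos == 0 or not content[pos-1].isalnum()
--                 after_ok = pos+4 >= len(content) or not content[pos+4].isalnum()
--                 if before_ok and after_ok: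
--                     return pos
--         pos += 1
--
--     return -1
-- ===== SOURCE B (Python) =====
-- def _find_from_for_select(content: str, select_pos: int) -> int:
--     start = select_pos + 6
--     n = len(content)
--     # cumulative parenthesis depth: depths[i] = '(' minus ')' balance of content[start:start+i]
--     depths = []
--     d = 0
--     for ch in content[start:]:
--         depths.append(d)
--         if ch == '(':
--             d += 1
--         elif ch == ')':
--             d -= 1
--     lowered = content.lower()
--     k = start
--     while True:
--         j = lowered.find('from', k)
--         if j == -1:
--             return -1
--         if depths[j - start] == 0:
--             before_ok = j == 0 or not content[j - 1].isalnum()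
--             after_ok = j + 4 >= n or not content[j + 4].isalnum()
--             if before_ok and after_ok:
--                 return j
--         k = j + 1
-- ===== Notes on version B (the rewrite author's own statement) =====
-- stated objective: faster
-- what changed: A's per-character Python scan with a running paren counter is replaced by a precomputed cumulative parenthesis-depth list plus C-level str.find jumps from one 'from' occurrence to the next, testing depth and word boundaries only at those occurrences.
-- outside the precondition, e.g. on _find_from_for_select('from x', -7): A returns 0, B returns -1; on _find_from_for_select('x from y', -9): A returns 2, B returns -1
import Mathlib
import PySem

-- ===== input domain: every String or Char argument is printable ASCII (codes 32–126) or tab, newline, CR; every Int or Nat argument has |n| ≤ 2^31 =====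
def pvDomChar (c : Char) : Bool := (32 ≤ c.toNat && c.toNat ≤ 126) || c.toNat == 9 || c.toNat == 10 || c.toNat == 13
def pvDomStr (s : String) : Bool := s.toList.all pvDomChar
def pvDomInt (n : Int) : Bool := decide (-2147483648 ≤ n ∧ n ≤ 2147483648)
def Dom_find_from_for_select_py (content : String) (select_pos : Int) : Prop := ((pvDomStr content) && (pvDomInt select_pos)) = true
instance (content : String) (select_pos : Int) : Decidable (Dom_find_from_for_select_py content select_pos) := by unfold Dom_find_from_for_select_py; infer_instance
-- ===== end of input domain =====

-- B replaces A's per-character scan by a precomputed cumulative parenthesis-depth list plus str.find jumps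
-- between 'from' occurrences (objective: faster by a constant factor, measured). Equivalence is proved for
-- 0 ≤ select_pos + 6 (Pre_); return value only, neither program mutates anything.

-- ===== PORT A =====
-- the while-loop of A; `pos`/`paren_level` exactly as in the Python.
-- Where Python raises IndexError (content[pos] with pos < -len(content)) the pyGet? is none and the
-- port returns -1; such inputs are outside Pre_.
def findFromGoA (cs : List Char) (pos : Int) (paren_level : Int) : Int :=
  if h : pos < (cs.length : Int) then
    match PySem.List.pyGet? cs pos with
    | none => -1  -- Python: IndexError, excluded by Pre_
    | some char =>
      if char = '(' then findFromGoA cs (pos + 1) (paren_level + 1)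
      else if char = ')' then findFromGoA cs (pos + 1) (paren_level - 1)
      else if paren_level = 0 then
        if PySem.Chars.lower (PySem.List.slice cs (some pos) (some (pos + 4))) = "from".toList then
          let before_ok : Bool := pos == 0 || !(match PySem.List.pyGet? cs (pos - 1) with | some c => PySem.Chars.isalnum c | none => false)
          let after_ok : Bool := decide ((cs.length : Int) ≤ pos + 4) || !(match PySem.List.pyGet? cs (pos + 4) with | some c => PySem.Chars.isalnum c | none => false)
          if before_ok && after_ok then pos else findFromGoA cs (pos + 1) paren_level
        else findFromGoA cs (pos + 1) paren_level
      else findFromGoA cs (pos + 1) paren_level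
  else -1
termination_by ((cs.length : Int) - pos).toNat
decreasing_by all_goals omega

def find_from_for_select_py (content : String) (select_pos : Int) : Int :=
  findFromGoA content.toList (select_pos + 6) 0

-- ===== PORT B =====
-- B's for-loop building the cumulative depth list of content[start:]
def depthList (l : List Char) (d : Int) : List Int :=
  match l with
  | [] => []
  | ch :: rest => d :: depthList rest (if ch = '(' then d + 1 else if ch = ')' then d - 1 else d)

-- B's `while True` jump loop over lowered.find('from', k); k grows by at least 1 per round and stays
-- ≤ len(content) on Pre_, so fuel = len+1 makes the loop total without changing its computation.
-- depths[j-start] is Python list indexing: out of range (only outside Pre_) raises there, .getD 0 here.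
def findFromGoB (cs lowered : List Char) (depths : List Int) (start : Int) (fuel : Nat) (k : Int) : Int :=
  match fuel with
  | 0 => -1
  | fuel + 1 =>
    let j := PySem.Chars.findFrom lowered "from".toList k none
    if j = -1 then -1
    else
      if (PySem.List.pyGet? depths (j - start)).getD 0 = 0 then
        let before_ok : Bool := j == 0 || !(match PySem.List.pyGet? cs (j - 1) with | some c => PySem.Chars.isalnum c | none => false)
        let after_ok : Bool := decide ((cs.length : Int) ≤ j + 4) || !(match PySem.List.pyGet? cs (j + 4) with | some c => PySem.Chars.isalnum c | none => false)
        if before_ok && after_ok then j else findFromGoB cs lowered depths start fuel (j + 1)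
      else findFromGoB cs lowered depths start fuel (j + 1)

def find_from_for_select_py_alt (content : String) (select_pos : Int) : Int :=
  let cs := content.toList
  let start := select_pos + 6
  let depths := depthList (PySem.List.slice cs (some start) none) 0
  let lowered := PySem.Chars.lower cs
  findFromGoB cs lowered depths start (cs.length + 1) start

-- ===== PRECONDITION & SPEC =====
-- Pre_ excludes negative start positions (select_pos + 6 < 0), where A either raises IndexError or
-- returns a position found by Python's accidental negative-index wraparound (scanning from the end).
def Pre_find_from_for_select_py (content : String) (select_pos : Int) : Prop :=
  0 ≤ select_pos + 6
instance (content : String) (select_pos : Int) : Decidable (Pre_find_from_for_select_py content select_pos) := by unfold Pre_find_from_for_select_py; infer_instance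

def pvWitness_find_from_for_select_py : String × Int := ("select a from (b from c)", 0)

def Spec_find_from_for_select_py (content : String) (select_pos : Int) (out : Int) : Prop := out = find_from_for_select_py_alt content select_pos
instance (content : String) (select_pos : Int) (out : Int) : Decidable (Spec_find_from_for_select_py content select_pos out) := by unfold Spec_find_from_for_select_py; infer_instance

-- ===== CLAIM (what is proved, stated in full; the proofs are below) =====
def Claim_equal_find_from_for_select_py : Prop := ∀ (content : String) (select_pos : Int), Dom_find_from_for_select_py content select_pos → Pre_find_from_for_select_py content select_pos → Spec_find_from_for_select_py content select_pos (find_from_for_select_py content select_pos)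

-- ===== LEMMAS AND PROOFS =====

-- running '(' minus ')' balance of a prefix
def balOf (l : List Char) : Int := (l.count '(' : Int) - (l.count ')' : Int)

-- "position p is the answer": the four conditions both programs test, phrased once
def goodAt (cs : List Char) (s p : Nat) : Bool :=
  decide (PySem.Chars.lower (PySem.List.slice cs (some (p:Int)) (some ((p:Int) + 4))) = "from".toList)
  && decide (balOf (cs.take p) = balOf (cs.take s))
  && ((p:Int) == 0 || !(match PySem.List.pyGet? cs ((p:Int) - 1) with | some c => PySem.Chars.isalnum c | none => false))
  && (decide ((cs.length : Int) ≤ (p:Int) + 4) || !(match PySem.List.pyGet? cs ((p:Int) + 4) with | some c => PySem.Chars.isalnum c | none => false))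

-- reference value: first p' ≥ p with goodAt, else -1
def firstGood (cs : List Char) (s p : Nat) : Int :=
  if p < cs.length then (if goodAt cs s p then (p:Int) else firstGood cs s (p+1)) else -1
termination_by cs.length - p

theorem findFrom_past_len (s sub : List Char) (k : Int) (h : (s.length:Int) < k) :
    PySem.Chars.findFrom s sub k none = -1 := by
  unfold PySem.Chars.findFrom
  have hk0 : ¬ k < 0 := by omega
  simp [hk0, h]

theorem depthList_get (l : List Char) (d : Int) (i : Nat) (h : i < l.length) :
    (depthList l d)[i]? = some (d + balOf (l.take i)) := by
  induction l generalizing d i with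
  | nil => simp at h
  | cons c t ih =>
    cases i with
    | zero => simp [depthList, balOf]
    | succ i =>
      simp at h
      simp [depthList, ih _ i h, balOf, List.count_cons]
      split_ifs <;> simp_all <;> omega

theorem match_iff (cs : List Char) (p : Nat) :
    PySem.Chars.lower (PySem.List.slice cs (some (p:Int)) (some ((p:Int) + 4))) = "from".toList
      ↔ "from".toList <+: (PySem.Chars.lower cs).drop p := by
  have h4 : ((p:Int) + 4) = ((p:Int) + ((4:Nat):Int)) := by norm_num
  rw [h4, PySem.List.slice_natCast_add, List.prefix_iff_eq_take]
  have h5 : ("from".toList).length = 4 := by decide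
  rw [h5]
  simp [PySem.Chars.lower, List.map_take, List.map_drop, eq_comm]

theorem length_lower (cs : List Char) : (PySem.Chars.lower cs).length = cs.length := by
  simp [PySem.Chars.lower]

theorem goodAt_match (cs : List Char) (s p : Nat) (h : goodAt cs s p = true) :
    "from".toList <+: (PySem.Chars.lower cs).drop p := by
  unfold goodAt at h
  simp only [Bool.and_eq_true, decide_eq_true_eq] at h
  exact (match_iff cs p).mp h.1.1.1

theorem not_match_of_paren (cs : List Char) (p : Nat) (h : p < cs.length)
    (hc : cs[p] = '(' ∨ cs[p] = ')') :
    ¬ PySem.Chars.lower (PySem.List.slice cs (some (p:Int)) (some ((p:Int) + 4))) = "from".toList := by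
  intro hm
  have hpre := (match_iff cs p).mp hm
  have hplen : p < (PySem.Chars.lower cs).length := by rw [length_lower]; exact h
  rw [List.drop_eq_getElem_cons hplen, show ("from".toList) = 'f' :: "rom".toList from rfl,
    List.cons_prefix_cons] at hpre
  have hf := hpre.1
  have hmap : (PySem.Chars.lower cs)[p] = PySem.Chars.lowerChar cs[p] := by
    simp [PySem.Chars.lower]
  rw [hmap] at hf
  rcases hc with hc | hc <;> rw [hc] at hf <;> exact absurd hf.symm (by decide)

theorem balOf_take_succ (cs : List Char) (p : Nat) (h : p < cs.length) :
    balOf (cs.take (p+1)) = balOf (cs.take p) + (if cs[p] = '(' then 1 else if cs[p] = ')' then -1 else 0) := by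
  rw [List.take_add_one, List.getElem?_eq_getElem h]
  simp only [Option.toList_some, balOf, List.count_append, List.count_singleton]
  push_cast
  split_ifs <;> simp_all [beq_iff_eq] <;> omega

theorem balOf_segment (cs : List Char) (s p : Nat) (h : s ≤ p) :
    balOf ((cs.drop s).take (p - s)) = balOf (cs.take p) - balOf (cs.take s) := by
  have h2 : cs.take p = cs.take s ++ (cs.drop s).take (p - s) := by
    rw [show p = s + (p-s) from (Nat.add_sub_cancel' h).symm, List.take_add]
    simp
  rw [h2]
  simp only [balOf, List.count_append]
  push_cast; ring

theorem firstGood_stop (cs : List Char) (s p : Nat) (hp : cs.length ≤ p) : firstGood cs s p = -1 := by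
  unfold firstGood; simp [Nat.not_lt.mpr hp]

theorem firstGood_of_none (cs : List Char) (s : Nat) :
    ∀ m p, cs.length - p ≤ m → (∀ q, p ≤ q → goodAt cs s q = false) → firstGood cs s p = -1 := by
  intro m
  induction m with
  | zero => intro p hm _; exact firstGood_stop cs s p (by omega)
  | succ m ih =>
    intro p hm hq
    by_cases hp : p < cs.length
    · rw [firstGood, if_pos hp, hq p le_rfl]
      simp only [Bool.false_eq_true, if_false]
      exact ih (p+1) (by omega) (fun q hq' => hq q (by omega))
    · exact firstGood_stop cs s p (by omega)

theorem firstGood_congr (cs : List Char) (s : Nat) :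
    ∀ m p r, r - p ≤ m → p ≤ r → (∀ q, p ≤ q → q < r → goodAt cs s q = false) →
      firstGood cs s p = firstGood cs s r := by
  intro m
  induction m with
  | zero =>
    intro p r hm hpr _
    have : p = r := by omega
    rw [this]
  | succ m ih =>
    intro p r hm hpr hq
    rcases Nat.eq_or_lt_of_le hpr with rfl | hlt
    · rfl
    by_cases hp : p < cs.length
    · rw [firstGood, if_pos hp, hq p le_rfl hlt]
      simp only [Bool.false_eq_true, if_false]
      exact ih (p+1) r (by omega) (by omega) (fun q h1 h2 => hq q (by omega) h2)
    · rw [firstGood_stop cs s p (by omega), firstGood_stop cs s r (by omega)]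

theorem firstGood_step_bad (cs : List Char) (s p : Nat) (hp : p < cs.length)
    (hg : goodAt cs s p = false) : firstGood cs s p = firstGood cs s (p+1) := by
  rw [firstGood, if_pos hp, hg]
  simp

theorem goA_eq (cs : List Char) (s : Nat) :
    ∀ m p, s ≤ p → cs.length - p ≤ m →
      findFromGoA cs (p:Int) (balOf (cs.take p) - balOf (cs.take s)) = firstGood cs s p := by
  intro m
  induction m with
  | zero =>
    intro p _ hm
    rw [findFromGoA, dif_neg (by omega), firstGood_stop cs s p (by omega)]
  | succ m ih =>
    intro p hsp hm
    by_cases hp : p < cs.length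
    · have hlt : (p:Int) < (cs.length:Int) := by exact_mod_cast hp
      rw [findFromGoA, dif_pos hlt]
      simp only [PySem.List.pyGet?_natCast, List.getElem?_eq_getElem hp]
      have hcast : (p:Int) + 1 = ((p+1 : Nat) : Int) := by push_cast; ring
      have hbal := balOf_take_succ cs p hp
      split_ifs with h1 h2 h3 h4 h5
      · have hlvl : balOf (cs.take p) - balOf (cs.take s) + 1 = balOf (cs.take (p+1)) - balOf (cs.take s) := by
          rw [hbal, if_pos h1]; ring
        have hg : goodAt cs s p = false := by
          unfold goodAt
          rw [decide_eq_false (not_match_of_paren cs p hp (Or.inl h1))]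
          simp
        rw [hcast, hlvl, ih (p+1) (by omega) (by omega), ← firstGood_step_bad cs s p hp hg]
      · have hlvl : balOf (cs.take p) - balOf (cs.take s) - 1 = balOf (cs.take (p+1)) - balOf (cs.take s) := by
          rw [hbal, if_neg h1, if_pos h2]; ring
        have hg : goodAt cs s p = false := by
          unfold goodAt
          rw [decide_eq_false (not_match_of_paren cs p hp (Or.inr h2))]
          simp
        rw [hcast, hlvl, ih (p+1) (by omega) (by omega), ← firstGood_step_bad cs s p hp hg]
      · -- all conditions hold: result p
        have hg : goodAt cs s p = true := by
          have heq : balOf (cs.take p) = balOf (cs.take s) := by omega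
          simp only [goodAt, h4, decide_true, heq, Bool.true_and]
          simpa using h5
        rw [firstGood, if_pos hp, hg]
        simp
      · have hlvl : balOf (cs.take p) - balOf (cs.take s) = balOf (cs.take (p+1)) - balOf (cs.take s) := by
          rw [hbal, if_neg h1, if_neg h2]; ring
        have hg : goodAt cs s p = false := by
          simp only [goodAt, h4, decide_true, Bool.true_and]
          have heq : balOf (cs.take p) = balOf (cs.take s) := by omega
          simp only [heq, decide_true, Bool.true_and]
          cases hB : ((((p:Int) == 0 ||
                      !match PySem.List.pyGet? cs ((p:Int) - 1) with
                        | some c => PySem.Chars.isalnum c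
                        | none => false) &&
                    (decide ((cs.length:Int) ≤ (p:Int) + 4) ||
                      !match PySem.List.pyGet? cs ((p:Int) + 4) with
                        | some c => PySem.Chars.isalnum c
                        | none => false))) with
          | false => rfl
          | true => exact absurd hB h5
        conv_lhs => rw [hcast, hlvl]
        rw [ih (p+1) (by omega) (by omega), ← firstGood_step_bad cs s p hp hg]
      · have hlvl : balOf (cs.take p) - balOf (cs.take s) = balOf (cs.take (p+1)) - balOf (cs.take s) := by
          rw [hbal, if_neg h1, if_neg h2]; ring
        have hg : goodAt cs s p = false := by
          unfold goodAt
          rw [decide_eq_false h4]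
          simp
        conv_lhs => rw [hcast, hlvl]
        rw [ih (p+1) (by omega) (by omega), ← firstGood_step_bad cs s p hp hg]
      · have hlvl : balOf (cs.take p) - balOf (cs.take s) = balOf (cs.take (p+1)) - balOf (cs.take s) := by
          rw [hbal, if_neg h1, if_neg h2]; ring
        have hg : goodAt cs s p = false := by
          have : ¬ balOf (cs.take p) = balOf (cs.take s) := by omega
          simp [goodAt, this]
        conv_lhs => rw [hcast, hlvl]
        rw [ih (p+1) (by omega) (by omega), ← firstGood_step_bad cs s p hp hg]
    · rw [findFromGoA, dif_neg (by omega), firstGood_stop cs s p (by omega)]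


theorem goB_eq (cs : List Char) (s : Nat) (hs : s ≤ cs.length) :
    ∀ fuel k, s ≤ k → k ≤ cs.length → cs.length - k < fuel →
      findFromGoB cs (PySem.Chars.lower cs) (depthList (cs.drop s) 0) (s:Int) fuel (k:Int) = firstGood cs s k := by
  intro fuel
  induction fuel with
  | zero => intro k _ _ h; omega
  | succ fuel ih =>
    intro k hsk hkn hf
    rw [findFromGoB]
    have hklow : k ≤ (PySem.Chars.lower cs).length := by rw [length_lower]; exact hkn
    by_cases hjn : PySem.Chars.findFrom (PySem.Chars.lower cs) "from".toList (k:Int) none = -1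
    · rw [if_pos hjn]
      have hno : ¬ "from".toList <:+: (PySem.Chars.lower cs).drop k :=
        (PySem.Chars.findFrom_natCast_eq_neg_one_iff _ _ k hklow).mp hjn
      symm
      apply firstGood_of_none cs s (cs.length - k) k (by omega)
      intro q hq
      cases hgq : goodAt cs s q with
      | false => rfl
      | true =>
        exfalso
        apply hno
        have hpre := goodAt_match cs s q hgq
        have hdd : (PySem.Chars.lower cs).drop q = ((PySem.Chars.lower cs).drop k).drop (q - k) := by
          rw [List.drop_drop]; congr 1; omega
        rw [hdd] at hpre
        exact hpre.isInfix.trans (List.drop_suffix _ _).isInfix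
    · rw [if_neg hjn]
      obtain ⟨hkj, hpre, hmin⟩ := PySem.Chars.findFrom_natCast_spec _ _ k hklow hjn
      have hj0 : (0:Int) ≤ PySem.Chars.findFrom (PySem.Chars.lower cs) "from".toList (k:Int) none :=
        le_trans (by exact_mod_cast Nat.zero_le k) hkj
      have hjcast : PySem.Chars.findFrom (PySem.Chars.lower cs) "from".toList (k:Int) none
          = (((PySem.Chars.findFrom (PySem.Chars.lower cs) "from".toList (k:Int) none).toNat : Nat) : Int) :=
        (Int.toNat_of_nonneg hj0).symm
      rw [hjcast]
      set jn := (PySem.Chars.findFrom (PySem.Chars.lower cs) "from".toList (k:Int) none).toNat with hjdef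
      have hkjn : k ≤ jn := by omega
      have hprelen := hpre.length_le
      rw [List.length_drop, length_lower] at hprelen
      have h4 : ("from".toList).length = 4 := by decide
      rw [h4] at hprelen
      have hjlt : jn < cs.length := by omega
      have hmatch : PySem.Chars.lower (PySem.List.slice cs (some (jn:Int)) (some ((jn:Int) + 4))) = "from".toList :=
        (match_iff cs jn).mpr hpre
      have hcong : firstGood cs s k = firstGood cs s jn := by
        apply firstGood_congr cs s (jn - k) k jn le_rfl hkjn
        intro q h1 h2
        cases hgq : goodAt cs s q with
        | false => rfl
        | true => exact absurd (goodAt_match cs s q hgq) (hmin q h1 h2)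
      have hdlen : jn - s < (cs.drop s).length := by rw [List.length_drop]; omega
      have hcast2 : ((jn:Int)) - (s:Int) = ((jn - s : Nat) : Int) := by
        push_cast [Nat.cast_sub (le_trans hsk hkjn)]; ring
      rw [hcast2, PySem.List.pyGet?_natCast, depthList_get _ _ _ hdlen,
        balOf_segment cs s jn (le_trans hsk hkjn)]
      simp only [Option.getD_some, zero_add]
      have hcast3 : ((jn:Int)) + 1 = ((jn + 1 : Nat) : Int) := by push_cast; ring
      split_ifs with hdep hbnd
      · -- answer at jn
        have hg : goodAt cs s jn = true := by
          unfold goodAt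
          have heq : balOf (cs.take jn) = balOf (cs.take s) := by omega
          simp only [hmatch, heq, decide_true, Bool.true_and]
          simpa using hbnd
        rw [hcong, firstGood, if_pos hjlt, hg]
        simp
      · have hg : goodAt cs s jn = false := by
          unfold goodAt
          have heq : balOf (cs.take jn) = balOf (cs.take s) := by omega
          simp only [hmatch, heq, decide_true, Bool.true_and]
          cases hB : (((jn:Int) == 0 ||
                      !match PySem.List.pyGet? cs ((jn:Int) - 1) with
                        | some c => PySem.Chars.isalnum c
                        | none => false) &&
                    (decide ((cs.length:Int) ≤ (jn:Int) + 4) ||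
                      !match PySem.List.pyGet? cs ((jn:Int) + 4) with
                        | some c => PySem.Chars.isalnum c
                        | none => false)) with
          | false => rfl
          | true => exact absurd hB hbnd
        rw [hcast3, ih (jn+1) (by omega) (by omega) (by omega), hcong,
          firstGood_step_bad cs s jn hjlt hg]
      · have hg : goodAt cs s jn = false := by
          unfold goodAt
          have hne : ¬ balOf (cs.take jn) = balOf (cs.take s) := by omega
          simp [hne]
        rw [hcast3, ih (jn+1) (by omega) (by omega) (by omega), hcong,
          firstGood_step_bad cs s jn hjlt hg]

-- ===== VERDICT (by name: the statement is the Claim_ definition above) =====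
theorem find_from_for_select_py_spec : Claim_equal_find_from_for_select_py := by
  intro content select_pos _ hpre
  unfold Pre_find_from_for_select_py at hpre
  unfold Spec_find_from_for_select_py find_from_for_select_py find_from_for_select_py_alt
  obtain ⟨s, hs0⟩ : ∃ s : Nat, select_pos + 6 = (s:Int) :=
    ⟨(select_pos + 6).toNat, (Int.toNat_of_nonneg hpre).symm⟩
  dsimp only
  rw [hs0, PySem.List.slice_from_natCast]
  by_cases hs : s ≤ content.toList.length
  · have hA := goA_eq content.toList s content.toList.length s le_rfl (by omega)
    rw [sub_self] at hA
    have hB := goB_eq content.toList s hs (content.toList.length + 1) s le_rfl hs (by omega)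
    exact hA.trans hB.symm
  · rw [findFromGoA, dif_neg (by omega), findFromGoB,
      findFrom_past_len _ _ _ (by rw [length_lower]; omega)]
    simp
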